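-- pv_equiv track=rewrite | github.com/GundalaNikhil/DSA | dsa-problems/Stacks/solutions/STK-013-auditorium-histogram-one-booster.py | max_area_with_boost
-- ===== SOURCE A (Python) =====
-- def max_area_with_boost(h: list[int], b: int) -> int:
--     n = len(h)
--     tree = [0] * (4 * n)
--
--     def build(node, start, end):
--         if start == end:
--             tree[node] = h[start]
--         else:
--             mid = (start + end) // 2
--             build(2 * node, start, mid)
--             build(2 * node + 1, mid + 1, end)
--             tree[node] = min(tree[2 * node], tree[2 * node + 1])
--
--     build(1, 0, n - 1)
--
--     def find_last_less(node, start, end, l, r, val):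
--         if l > r or tree[node] >= val:
--             return -1
--         if start == end:
--             return start
--         mid = (start + end) // 2
--         res = -1
--         if mid < r:
--             res = find_last_less(2 * node + 1, mid + 1, end, l, r, val)
--         if res != -1:
--             return res
--         if l <= mid:
--             return find_last_less(2 * node, start, mid, l, r, val)
--         return -1
--
--     def find_first_less(node, start, end, l, r, val):
--         if l > r or tree[node] >= val:
--             return -1
--         if start == end:
--             return start
--         mid = (start + end) // 2
--         res = -1
--         if l <= mid:
--             res = find_first_less(2 * node, start, mid, l, r, val)
--         if res != -1:
--             return res
--         if mid < r:
--             return find_first_less(2 * node + 1, mid + 1, end, l, r, val)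
--         return -1
--
--     max_area = 0
--
--     for i in range(n):
--         # Case 1: Boosted h[i]
--         boosted_h = h[i] + b
--         L = find_last_less(1, 0, n - 1, 0, i - 1, boosted_h)
--         R = find_first_less(1, 0, n - 1, i + 1, n - 1, boosted_h)
--         if R == -1: R = n
--         max_area = max(max_area, boosted_h * (R - L - 1))
--
--         # Case 2: Normal h[i]
--         normal_h = h[i]
--         L1 = find_last_less(1, 0, n - 1, 0, i - 1, normal_h)
--         R1 = find_first_less(1, 0, n - 1, i + 1, n - 1, normal_h)
--         if R1 == -1: R1 = n
--
--         max_area = max(max_area, normal_h * (R1 - L1 - 1))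
--
--         if L1 != -1 and h[L1] + b >= normal_h:
--             L2 = find_last_less(1, 0, n - 1, 0, L1 - 1, normal_h)
--             max_area = max(max_area, normal_h * (R1 - L2 - 1))
--
--         if R1 != n and h[R1] + b >= normal_h:
--             R2 = find_first_less(1, 0, n - 1, R1 + 1, n - 1, normal_h)
--             if R2 == -1: R2 = n
--             max_area = max(max_area, normal_h * (R2 - L1 - 1))
--
--     return max_area
-- ===== SOURCE B (Python) =====
-- def max_area_with_boost(h: list[int], b: int) -> int:
--     n = len(h)
--
--     def last_less(r, val):
--         # last index j in [0, r] with h[j] < val, else -1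
--         for j in range(r, -1, -1):
--             if h[j] < val:
--                 return j
--         return -1
--
--     def first_less(l, val):
--         # first index j in [l, n-1] with h[j] < val, else n
--         for j in range(l, n):
--             if h[j] < val:
--                 return j
--         return n
--
--     best = 0
--     for i in range(n):
--         bh = h[i] + b
--         L = last_less(i - 1, bh)
--         R = first_less(i + 1, bh)
--         best = max(best, bh * (R - L - 1))
--
--         v = h[i]
--         L1 = last_less(i - 1, v)
--         R1 = first_less(i + 1, v)
--         best = max(best, v * (R1 - L1 - 1))
--
--         if L1 != -1 and h[L1] + b >= v:
--             best = max(best, v * (R1 - last_less(L1 - 1, v) - 1))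
--
--         if R1 != n and h[R1] + b >= v:
--             best = max(best, v * (first_less(R1 + 1, v) - L1 - 1))
--
--     return best
-- ===== Notes on version B (the rewrite author's own statement) =====
-- stated objective: simpler
-- what changed: Replaced A's segment tree (recursive build plus recursive range-descent queries for previous/next/second strictly-smaller indices) by direct backward/forward linear scans of the list.
import Mathlib
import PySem

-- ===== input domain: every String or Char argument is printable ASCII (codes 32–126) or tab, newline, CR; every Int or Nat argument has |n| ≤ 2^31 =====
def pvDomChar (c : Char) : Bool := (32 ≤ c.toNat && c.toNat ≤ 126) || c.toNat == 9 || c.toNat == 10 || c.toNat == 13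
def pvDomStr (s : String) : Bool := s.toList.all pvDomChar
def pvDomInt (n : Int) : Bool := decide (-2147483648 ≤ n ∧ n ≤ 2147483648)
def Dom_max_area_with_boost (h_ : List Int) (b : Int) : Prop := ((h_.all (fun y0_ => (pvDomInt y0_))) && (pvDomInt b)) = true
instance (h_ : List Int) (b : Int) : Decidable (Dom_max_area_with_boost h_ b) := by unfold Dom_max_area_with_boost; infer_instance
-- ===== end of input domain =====

-- B replaces A's segment tree (recursive build plus recursive range-descent queries)
-- by direct linear scans for the previous/next strictly-smaller index: simpler, no tree.
-- A raises RecursionError on the empty list (excluded by Pre_); B returns 0 there.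

-- ===== PORT A =====
-- build(node, start, end): writes min of h[start..end] into tree[node]; fuel models the
-- recursion depth (n is always enough inside Pre_; fuel 0 models Python's divergence on n = 0).
def buildA (h : List Int) : Nat → Nat → Nat → Nat → List Int → List Int
  | 0, _, _, _, t => t
  | f+1, node, s, e, t =>
    if s = e then t.set node (h.getD s 0)
    else
      let mid := (s+e)/2
      let t1 := buildA h f (2*node) s mid t
      let t2 := buildA h f (2*node+1) (mid+1) e t1
      t2.set node (min (t2.getD (2*node) 0) (t2.getD (2*node+1) 0))

-- find_last_less(node, start, end, l, r, val)
def qLast (t : List Int) : Nat → Nat → Nat → Nat → Int → Int → Int → Int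
  | 0, _, _, _, _, _, _ => -1
  | f+1, node, s, e, l, r, val =>
    if l > r ∨ val ≤ t.getD node 0 then -1
    else if s = e then (s : Int)
    else
      let mid := (s+e)/2
      let res := if (mid:Int) < r then qLast t f (2*node+1) (mid+1) e l r val else -1
      if res ≠ -1 then res
      else if l ≤ (mid:Int) then qLast t f (2*node) s mid l r val
      else -1

-- find_first_less(node, start, end, l, r, val)
def qFirst (t : List Int) : Nat → Nat → Nat → Nat → Int → Int → Int → Int
  | 0, _, _, _, _, _, _ => -1
  | f+1, node, s, e, l, r, val =>
    if l > r ∨ val ≤ t.getD node 0 then -1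
    else if s = e then (s : Int)
    else
      let mid := (s+e)/2
      let res := if l ≤ (mid:Int) then qFirst t f (2*node) s mid l r val else -1
      if res ≠ -1 then res
      else if (mid:Int) < r then qFirst t f (2*node+1) (mid+1) e l r val
      else -1

def max_area_with_boost (h_ : List Int) (b : Int) : Int :=
  let n := h_.length
  let t := buildA h_ n 1 0 (n-1) (List.replicate (4*n) 0)
  (List.range n).foldl (fun acc i =>
    let bh := h_.getD i 0 + b
    let L := qLast t n 1 0 (n-1) 0 ((i:Int)-1) bh
    let R := if qFirst t n 1 0 (n-1) ((i:Int)+1) ((n:Int)-1) bh = -1 then (n:Int)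
             else qFirst t n 1 0 (n-1) ((i:Int)+1) ((n:Int)-1) bh
    let a1 := max acc (bh * (R - L - 1))
    let v := h_.getD i 0
    let L1 := qLast t n 1 0 (n-1) 0 ((i:Int)-1) v
    let R1 := if qFirst t n 1 0 (n-1) ((i:Int)+1) ((n:Int)-1) v = -1 then (n:Int)
              else qFirst t n 1 0 (n-1) ((i:Int)+1) ((n:Int)-1) v
    let a2 := max a1 (v * (R1 - L1 - 1))
    let a3 := if L1 ≠ -1 ∧ v ≤ h_.getD L1.toNat 0 + b then
        max a2 (v * (R1 - qLast t n 1 0 (n-1) 0 (L1-1) v - 1)) else a2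
    if R1 ≠ (n:Int) ∧ v ≤ h_.getD R1.toNat 0 + b then
        max a3 (v * ((if qFirst t n 1 0 (n-1) (R1+1) ((n:Int)-1) v = -1 then (n:Int)
                      else qFirst t n 1 0 (n-1) (R1+1) ((n:Int)-1) v) - L1 - 1)) else a3) 0

-- ===== PORT B =====
-- last index j in [0, r] with h[j] < v, else -1 (backward scan)
def lastLess (h : List Int) (r v : Int) : Int :=
  if r < 0 then -1
  else if h.getD r.toNat 0 < v then r
  else lastLess h (r-1) v
termination_by (r+1).toNat
decreasing_by omega

-- first index j in [l, n-1] with h[j] < v, else n (forward scan)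
def firstLess (h : List Int) (l v : Int) : Int :=
  if (h.length : Int) ≤ l then (h.length : Int)
  else if h.getD l.toNat 0 < v then l
  else firstLess h (l+1) v
termination_by ((h.length : Int) - l).toNat
decreasing_by omega

def max_area_with_boost_alt (h_ : List Int) (b : Int) : Int :=
  let n := h_.length
  (List.range n).foldl (fun acc i =>
    let bh := h_.getD i 0 + b
    let L := lastLess h_ ((i:Int)-1) bh
    let R := firstLess h_ ((i:Int)+1) bh
    let a1 := max acc (bh * (R - L - 1))
    let v := h_.getD i 0
    let L1 := lastLess h_ ((i:Int)-1) v
    let R1 := firstLess h_ ((i:Int)+1) v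
    let a2 := max a1 (v * (R1 - L1 - 1))
    let a3 := if L1 ≠ -1 ∧ v ≤ h_.getD L1.toNat 0 + b then
        max a2 (v * (R1 - lastLess h_ (L1-1) v - 1)) else a2
    if R1 ≠ (n:Int) ∧ v ≤ h_.getD R1.toNat 0 + b then
        max a3 (v * (firstLess h_ (R1+1) v - L1 - 1)) else a3) 0

-- ===== PRECONDITION & SPEC =====
-- Pre_ excludes only the empty list, on which A's build recurses forever (RecursionError).
def Pre_max_area_with_boost (h_ : List Int) (b : Int) : Prop := h_ ≠ []
instance (h_ : List Int) (b : Int) : Decidable (Pre_max_area_with_boost h_ b) := by unfold Pre_max_area_with_boost; infer_instance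
def pvWitness_max_area_with_boost : List Int × Int := ([2, 1, 3], 1)

def Spec_max_area_with_boost (h_ : List Int) (b : Int) (out : Int) : Prop := out = max_area_with_boost_alt h_ b
instance (h_ : List Int) (b : Int) (out : Int) : Decidable (Spec_max_area_with_boost h_ b out) := by unfold Spec_max_area_with_boost; infer_instance

-- ===== CLAIM (what is proved, stated in full; the proofs are below) =====
def Claim_equal_max_area_with_boost : Prop := ∀ (h_ : List Int) (b : Int), Dom_max_area_with_boost h_ b → Pre_max_area_with_boost h_ b → Spec_max_area_with_boost h_ b (max_area_with_boost h_ b)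

-- ===== LEMMAS AND PROOFS =====

-- min of h[s..e] (for s ≤ e)
def rmin (h : List Int) (s e : Nat) : Int :=
  if e ≤ s then h.getD s 0
  else min (h.getD s 0) (rmin h (s+1) e)
termination_by e - s
decreasing_by omega

-- m is a node of the segment-tree subtree rooted at `node`
def InSub (node m : Nat) : Prop := ∃ k, m / 2^k = node

-- tree t stores the correct range minima on the whole recursion triple set of (node, s, e)
def GoodTree (t h : List Int) (node s e : Nat) : Prop :=
  t.getD node 0 = rmin h s e ∧
  (s < e → GoodTree t h (2*node) s ((s+e)/2) ∧ GoodTree t h (2*node+1) ((s+e)/2+1) e)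
termination_by e - s
decreasing_by all_goals omega

-- generalized scans used as the common specification of A's queries and B's scans
def glast (h : List Int) (l r v : Int) : Int :=
  if r < l then -1
  else if h.getD r.toNat 0 < v then r
  else glast h l (r-1) v
termination_by (r+1-l).toNat
decreasing_by omega

def gfirst (h : List Int) (l r v : Int) : Int :=
  if r < l then -1
  else if h.getD l.toNat 0 < v then l
  else gfirst h (l+1) r v
termination_by (r+1-l).toNat
decreasing_by omega

-- ----- rmin -----
theorem rmin_le (h : List Int) : ∀ d s e j : Nat, e - s = d → s ≤ j → j ≤ e → rmin h s e ≤ h.getD j 0 := by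
  intro d
  induction d with
  | zero =>
    intro s e j hd h1 h2
    have hes : e ≤ s := by omega
    have hj : j = s := by omega
    rw [rmin, if_pos hes, hj]
  | succ d ih =>
    intro s e j hd h1 h2
    have hse : ¬ e ≤ s := by omega
    rw [rmin, if_neg hse]
    rcases Nat.eq_or_lt_of_le h1 with hj | hj
    · exact le_trans (min_le_left _ _) (by rw [hj])
    · exact le_trans (min_le_right _ _) (ih (s+1) e j (by omega) (by omega) h2)

theorem rmin_split (h : List Int) : ∀ d s m e : Nat, m - s = d → s ≤ m → m < e →
    rmin h s e = min (rmin h s m) (rmin h (m+1) e) := by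
  intro d
  induction d with
  | zero =>
    intro s m e hd h1 h2
    have hm : m = s := by omega
    subst hm
    rw [rmin, if_neg (by omega)]
    rw [show rmin h m m = h.getD m 0 by rw [rmin, if_pos le_rfl]]
  | succ d ih =>
    intro s m e hd h1 h2
    have hsm : s < m := by omega
    rw [rmin, if_neg (by omega), ih (s+1) m e (by omega) (by omega) h2,
      show rmin h s m = min (h.getD s 0) (rmin h (s+1) m) by rw [rmin, if_neg (by omega)],
      min_assoc]

-- ----- InSub -----
theorem insub_self (node : Nat) : InSub node node := ⟨0, by simp⟩

theorem insub_step {node c m : Nat} (hc : c = 2*node ∨ c = 2*node+1) (hm : InSub c m) :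
    InSub node m := by
  obtain ⟨k, hk⟩ := hm
  refine ⟨k+1, ?_⟩
  rw [pow_succ, ← Nat.div_div_eq_div_mul, hk]
  rcases hc with rfl | rfl <;> omega

theorem not_insub_self_child {node c : Nat} (hn : 1 ≤ node) (hc : c = 2*node ∨ c = 2*node+1) :
    ¬ InSub c node := by
  rintro ⟨k, hk⟩
  have := Nat.div_le_self node (2^k)
  omega

theorem insub_disjoint {node m : Nat} (hn : 1 ≤ node) :
    InSub (2*node) m → InSub (2*node+1) m → False := by
  rintro ⟨k, hk⟩ ⟨j, hj⟩
  by_cases hkj : k ≤ j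
  · have hdd : m / 2^j = (m / 2^k) / 2^(j-k) := by
      rw [Nat.div_div_eq_div_mul, ← pow_add]
      congr 2
      omega
    rw [hk] at hdd
    rcases Nat.eq_or_lt_of_le hkj with rfl | hlt
    · omega
    · have h2 : (2:Nat) ≤ 2^(j-k) := by
        calc (2:Nat) = 2^1 := by norm_num
        _ ≤ 2^(j-k) := Nat.pow_le_pow_right (by norm_num) (by omega)
      have := Nat.div_le_div_left h2 (by norm_num) (a := 2*node)
      have h3 : 2*node/2 = node := by omega
      omega
  · have hdd : m / 2^k = (m / 2^j) / 2^(k-j) := by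
      rw [Nat.div_div_eq_div_mul, ← pow_add]
      congr 2
      omega
    rw [hj] at hdd
    have h2 : (2:Nat) ≤ 2^(k-j) := by
      calc (2:Nat) = 2^1 := by norm_num
      _ ≤ 2^(k-j) := Nat.pow_le_pow_right (by norm_num) (by omega)
    have := Nat.div_le_div_left h2 (by norm_num) (a := 2*node+1)
    have h3 : (2*node+1)/2 = node := by omega
    omega


-- ----- glast -----
theorem glast_none_of (h : List Int) (v : Int) : ∀ d : Nat, ∀ l r : Int, (r+1-l).toNat = d →
    (∀ j : Int, l ≤ j → j ≤ r → v ≤ h.getD j.toNat 0) → glast h l r v = -1 := by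
  intro d
  induction d with
  | zero => intro l r hd _; rw [glast, if_pos (by omega)]
  | succ d ih =>
    intro l r hd hall
    rw [glast, if_neg (by omega), if_neg (by exact not_lt.2 (hall r (by omega) le_rfl))]
    exact ih l (r-1) (by omega) (fun j h1 h2 => hall j h1 (by omega))

theorem glast_forall_of_none (h : List Int) (v : Int) : ∀ d : Nat, ∀ l r : Int, (r+1-l).toNat = d →
    0 ≤ l → glast h l r v = -1 → ∀ j : Int, l ≤ j → j ≤ r → v ≤ h.getD j.toNat 0 := by
  intro d
  induction d with
  | zero => intro l r hd _ _ j h1 h2; omega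
  | succ d ih =>
    intro l r hd hl hnone j h1 h2
    rw [glast, if_neg (by omega)] at hnone
    by_cases hhit : h.getD r.toNat 0 < v
    · rw [if_pos hhit] at hnone; omega
    · rw [if_neg hhit] at hnone
      rcases eq_or_lt_of_le h2 with rfl | hjr
      · exact not_lt.1 hhit
      · exact ih l (r-1) (by omega) hl hnone j h1 (by omega)

theorem glast_extend_left (h : List Int) (v : Int) : ∀ d : Nat, ∀ a l r : Int, (r+1-l).toNat = d →
    a ≤ l → glast h l r v ≠ -1 → glast h a r v = glast h l r v := by
  intro d
  induction d with
  | zero => intro a l r hd hal hne; rw [glast, if_pos (by omega)] at hne; omega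
  | succ d ih =>
    intro a l r hd hal hne
    have hrl : ¬ r < l := by
      intro hrl; rw [glast, if_pos hrl] at hne; omega
    conv_lhs => rw [glast]
    conv_rhs => rw [glast]
    rw [if_neg (show ¬ r < a by omega), if_neg hrl]
    by_cases hhit : h.getD r.toNat 0 < v
    · rw [if_pos hhit, if_pos hhit]
    · rw [glast, if_neg hrl, if_neg hhit] at hne
      rw [if_neg hhit, if_neg hhit]
      exact ih a l (r-1) (by omega) hal hne

theorem glast_drop_upper (h : List Int) (v : Int) : ∀ d : Nat, ∀ l m r : Int, (r - m).toNat = d →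
    m ≤ r → (∀ j : Int, m < j → j ≤ r → v ≤ h.getD j.toNat 0) → glast h l r v = glast h l m v := by
  intro d
  induction d with
  | zero =>
    intro l m r hd hmr _
    have : m = r := by omega
    rw [this]
  | succ d ih =>
    intro l m r hd hmr hall
    by_cases hrl : r < l
    · conv_lhs => rw [glast]
      conv_rhs => rw [glast]
      rw [if_pos hrl, if_pos (show m < l by omega)]
    · conv_lhs => rw [glast]
      rw [if_neg hrl, if_neg (by exact not_lt.2 (hall r (by omega) le_rfl))]
      exact ih l m (r-1) (by omega) (by omega) (fun j h1 h2 => hall j h1 (by omega))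

-- ----- gfirst -----
theorem gfirst_none_of (h : List Int) (v : Int) : ∀ d : Nat, ∀ l r : Int, (r+1-l).toNat = d →
    (∀ j : Int, l ≤ j → j ≤ r → v ≤ h.getD j.toNat 0) → gfirst h l r v = -1 := by
  intro d
  induction d with
  | zero => intro l r hd _; rw [gfirst, if_pos (by omega)]
  | succ d ih =>
    intro l r hd hall
    rw [gfirst, if_neg (by omega), if_neg (by exact not_lt.2 (hall l le_rfl (by omega)))]
    exact ih (l+1) r (by omega) (fun j h1 h2 => hall j (by omega) h2)

theorem gfirst_forall_of_none (h : List Int) (v : Int) : ∀ d : Nat, ∀ l r : Int, (r+1-l).toNat = d →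
    0 ≤ l → gfirst h l r v = -1 → ∀ j : Int, l ≤ j → j ≤ r → v ≤ h.getD j.toNat 0 := by
  intro d
  induction d with
  | zero => intro l r hd _ _ j h1 h2; omega
  | succ d ih =>
    intro l r hd hl hnone j h1 h2
    rw [gfirst, if_neg (by omega)] at hnone
    by_cases hhit : h.getD l.toNat 0 < v
    · rw [if_pos hhit] at hnone; omega
    · rw [if_neg hhit] at hnone
      rcases eq_or_lt_of_le h1 with rfl | hlj
      · exact not_lt.1 hhit
      · exact ih (l+1) r (by omega) (by omega) hnone j (by omega) h2

theorem gfirst_extend_right (h : List Int) (v : Int) : ∀ d : Nat, ∀ l r r' : Int, (r+1-l).toNat = d →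
    r ≤ r' → gfirst h l r v ≠ -1 → gfirst h l r' v = gfirst h l r v := by
  intro d
  induction d with
  | zero => intro l r r' hd hrr hne; rw [gfirst, if_pos (by omega)] at hne; omega
  | succ d ih =>
    intro l r r' hd hrr hne
    have hrl : ¬ r < l := by
      intro hrl; rw [gfirst, if_pos hrl] at hne; omega
    conv_lhs => rw [gfirst]
    conv_rhs => rw [gfirst]
    rw [if_neg (show ¬ r' < l by omega), if_neg hrl]
    by_cases hhit : h.getD l.toNat 0 < v
    · rw [if_pos hhit, if_pos hhit]
    · rw [gfirst, if_neg hrl, if_neg hhit] at hne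
      rw [if_neg hhit, if_neg hhit]
      exact ih (l+1) r r' (by omega) hrr hne

theorem gfirst_drop_lower (h : List Int) (v : Int) : ∀ d : Nat, ∀ l m r : Int, (m - l).toNat = d →
    l ≤ m → (∀ j : Int, l ≤ j → j < m → v ≤ h.getD j.toNat 0) → gfirst h l r v = gfirst h m r v := by
  intro d
  induction d with
  | zero =>
    intro l m r hd hlm _
    have : l = m := by omega
    rw [this]
  | succ d ih =>
    intro l m r hd hlm hall
    by_cases hrl : r < l
    · conv_lhs => rw [gfirst]
      conv_rhs => rw [gfirst]
      rw [if_pos hrl, if_pos (show r < m by omega)]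
    · conv_lhs => rw [gfirst]
      rw [if_neg hrl, if_neg (by exact not_lt.2 (hall l le_rfl (by omega)))]
      exact ih (l+1) m r (by omega) (by omega) (fun j h1 h2 => hall j (by omega) h2)

-- ----- B's scans vs glast/gfirst -----
theorem lastLess_eq_glast (h : List Int) (v : Int) : ∀ d : Nat, ∀ r : Int, (r+1).toNat = d →
    lastLess h r v = glast h 0 r v := by
  intro d
  induction d with
  | zero => intro r hd; rw [lastLess, if_pos (by omega), glast, if_pos (by omega)]
  | succ d ih =>
    intro r hd
    conv_lhs => rw [lastLess]
    conv_rhs => rw [glast]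
    simp only [if_neg (show ¬ r < 0 by omega)]
    by_cases hhit : h.getD r.toNat 0 < v
    · simp only [if_pos hhit]
    · simp only [if_neg hhit]; exact ih (r-1) (by omega)

theorem lastLess_range (h : List Int) (v : Int) : ∀ d : Nat, ∀ r : Int, (r+1).toNat = d →
    lastLess h r v = -1 ∨ (0 ≤ lastLess h r v ∧ lastLess h r v ≤ r) := by
  intro d
  induction d with
  | zero => intro r hd; rw [lastLess, if_pos (by omega)]; left; rfl
  | succ d ih =>
    intro r hd
    rw [lastLess, if_neg (show ¬ r < 0 by omega)]
    by_cases hhit : h.getD r.toNat 0 < v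
    · rw [if_pos hhit]; right; omega
    · rw [if_neg hhit]
      rcases ih (r-1) (by omega) with h1 | h1
      · left; exact h1
      · right; omega

theorem firstLess_eq_gfirst (h : List Int) (v : Int) : ∀ d : Nat, ∀ l : Int, ((h.length:Int) - l).toNat = d →
    0 ≤ l → firstLess h l v =
      (if gfirst h l ((h.length:Int)-1) v = -1 then (h.length:Int) else gfirst h l ((h.length:Int)-1) v) := by
  intro d
  induction d with
  | zero =>
    intro l hd hl
    rw [firstLess, if_pos (by omega), gfirst, if_pos (by omega)]
  | succ d ih =>
    intro l hd hl
    conv_lhs => rw [firstLess]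
    conv_rhs => rw [gfirst]
    simp only [if_neg (show ¬ (h.length:Int) ≤ l by omega),
      if_neg (show ¬ (h.length:Int)-1 < l by omega)]
    by_cases hhit : h.getD l.toNat 0 < v
    · simp only [if_pos hhit]
      rw [if_neg (show ¬ l = -1 by omega)]
    · simp only [if_neg hhit]
      exact ih (l+1) (by omega) (by omega)

theorem firstLess_range (h : List Int) (v : Int) : ∀ d : Nat, ∀ l : Int, ((h.length:Int) - l).toNat = d →
    0 ≤ l → l ≤ (h.length:Int) → l ≤ firstLess h l v ∧ firstLess h l v ≤ (h.length:Int) := by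
  intro d
  induction d with
  | zero =>
    intro l hd hl hln
    rw [firstLess, if_pos (show (h.length:Int) ≤ l by omega)]
    omega
  | succ d ih =>
    intro l hd hl hln
    rw [firstLess, if_neg (show ¬ (h.length:Int) ≤ l by omega)]
    by_cases hhit : h.getD l.toNat 0 < v
    · rw [if_pos hhit]; omega
    · rw [if_neg hhit]
      have := ih (l+1) (by omega) (by omega) (by omega)
      omega

-- ----- array write lemmas -----
theorem getD_set_ne' (t : List Int) (i j : Nat) (x d : Int) (hij : i ≠ j) :
    (t.set i x).getD j d = t.getD j d := by
  rw [List.getD_eq_getElem?_getD, List.getD_eq_getElem?_getD, List.getElem?_set_ne hij]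

theorem getD_set_self' (t : List Int) (i : Nat) (x d : Int) (hi : i < t.length) :
    (t.set i x).getD i d = x := by
  rw [List.getD_eq_getElem?_getD, List.getElem?_set_self hi]
  rfl

-- ----- buildA -----
theorem buildA_length (h : List Int) : ∀ f node s e t, (buildA h f node s e t).length = t.length := by
  intro f
  induction f with
  | zero => intro node s e t; rw [buildA]
  | succ f ih =>
    intro node s e t
    rw [buildA]
    by_cases hse : s = e
    · rw [if_pos hse, List.length_set]
    · rw [if_neg hse]
      simp only [List.length_set, ih]

theorem buildA_frame (h : List Int) : ∀ f node s e t m, ¬ InSub node m →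
    (buildA h f node s e t).getD m 0 = t.getD m 0 := by
  intro f
  induction f with
  | zero => intro node s e t m _; rw [buildA]
  | succ f ih =>
    intro node s e t m hm
    have hmn : node ≠ m := fun hh => hm (hh ▸ insub_self node)
    rw [buildA]
    by_cases hse : s = e
    · rw [if_pos hse, getD_set_ne' _ _ _ _ _ hmn]
    · rw [if_neg hse]
      simp only
      rw [getD_set_ne' _ _ _ _ _ hmn,
        ih (2*node+1) _ _ _ m (fun hc => hm (insub_step (Or.inr rfl) hc)),
        ih (2*node) _ _ _ m (fun hc => hm (insub_step (Or.inl rfl) hc))]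

theorem goodTree_congr : ∀ d : Nat, ∀ (node s e : Nat) (t t' h : List Int), e - s = d →
    (∀ m, InSub node m → t'.getD m 0 = t.getD m 0) → GoodTree t h node s e → GoodTree t' h node s e := by
  intro d
  induction d using Nat.strong_induction_on with
  | _ d ih =>
    intro node s e t t' h hd hagree hg
    rw [GoodTree] at hg ⊢
    refine ⟨by rw [hagree node (insub_self node)]; exact hg.1, fun hse => ?_⟩
    obtain ⟨g1, g2⟩ := hg.2 hse
    have hm1 : s ≤ (s+e)/2 := by omega
    have hm2 : (s+e)/2 < e := by omega
    constructor
    · exact ih ((s+e)/2 - s) (by omega) (2*node) s ((s+e)/2) t t' h rfl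
        (fun m hm => hagree m (insub_step (Or.inl rfl) hm)) g1
    · exact ih (e - ((s+e)/2+1)) (by omega) (2*node+1) ((s+e)/2+1) e t t' h rfl
        (fun m hm => hagree m (insub_step (Or.inr rfl) hm)) g2

theorem buildA_spec (h : List Int) : ∀ f node s e (t : List Int), s ≤ e → e+1-s ≤ f → 1 ≤ node →
    (node+1) * 2^(Nat.clog 2 (e+1-s)) ≤ t.length →
    GoodTree (buildA h f node s e t) h node s e := by
  intro f
  induction f with
  | zero => intro node s e t hs hf _ _; omega
  | succ f ih =>
    intro node s e t hse hf hnode hcap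
    have hnlen : node < t.length := by
      have h1 : 1 ≤ 2^(Nat.clog 2 (e+1-s)) := Nat.one_le_two_pow
      calc node < node + 1 := by omega
      _ ≤ (node+1) * 2^(Nat.clog 2 (e+1-s)) := Nat.le_mul_of_pos_right _ (by omega)
      _ ≤ t.length := hcap
    rw [buildA]
    by_cases heq : s = e
    · rw [if_pos heq]
      rw [GoodTree]
      subst heq
      refine ⟨?_, by omega⟩
      rw [getD_set_self' _ _ _ _ hnlen, rmin, if_pos le_rfl]
    · rw [if_neg heq]
      simp only
      have hslt : s < e := by omega
      set mid := (s+e)/2 with hmid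
      have hm1 : s ≤ mid := by omega
      have hm2 : mid < e := by omega
      -- capacity arithmetic
      set c := Nat.clog 2 (e+1-s) with hc
      have hc1 : 1 ≤ c := Nat.clog_pos (by norm_num) (by omega)
      have hlen2c : e+1-s ≤ 2^c := Nat.le_pow_clog (by norm_num) _
      have h2c : 2^c = 2 * 2^(c-1) := by
        rw [← pow_succ']
        congr 1
        omega
      have hllen : mid+1-s ≤ 2^(c-1) := by omega
      have hrlen : e-mid ≤ 2^(c-1) := by omega
      have hclogl : Nat.clog 2 (mid+1-s) ≤ c-1 := (Nat.clog_le_iff_le_pow (by norm_num)).2 hllen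
      have hclogr : Nat.clog 2 (e+1-(mid+1)) ≤ c-1 := by
        refine (Nat.clog_le_iff_le_pow (by norm_num)).2 ?_
        omega
      have hcapl : (2*node+1) * 2^(Nat.clog 2 (mid+1-s)) ≤ t.length := by
        calc (2*node+1) * 2^(Nat.clog 2 (mid+1-s))
            ≤ (2*node+2) * 2^(c-1) :=
              Nat.mul_le_mul (by omega) (Nat.pow_le_pow_right (by norm_num) hclogl)
        _ = (node+1) * 2^c := by rw [h2c]; ring
        _ ≤ t.length := hcap
      have hcapr : (2*node+1+1) * 2^(Nat.clog 2 (e+1-(mid+1))) ≤ t.length := by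
        calc (2*node+1+1) * 2^(Nat.clog 2 (e+1-(mid+1)))
            ≤ (2*node+2) * 2^(c-1) :=
              Nat.mul_le_mul (by omega) (Nat.pow_le_pow_right (by norm_num) hclogr)
        _ = (node+1) * 2^c := by rw [h2c]; ring
        _ ≤ t.length := hcap
      have g1 : GoodTree (buildA h f (2*node) s mid t) h (2*node) s mid :=
        ih (2*node) s mid t hm1 (by omega) (by omega) hcapl
      set t1 := buildA h f (2*node) s mid t with ht1
      have hlen1 : t1.length = t.length := buildA_length h f _ _ _ _
      have g2 : GoodTree (buildA h f (2*node+1) (mid+1) e t1) h (2*node+1) (mid+1) e :=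
        ih (2*node+1) (mid+1) e t1 (by omega) (by omega) (by omega) (by omega)
      set t2 := buildA h f (2*node+1) (mid+1) e t1 with ht2
      have hlen2 : t2.length = t.length := by rw [ht2, buildA_length, hlen1]
      have hfr21 : ∀ m, ¬ InSub (2*node+1) m → t2.getD m 0 = t1.getD m 0 := by
        intro m hm
        rw [ht2, buildA_frame h f _ _ _ _ _ hm]
      set mval := min (t2.getD (2*node) 0) (t2.getD (2*node+1) 0) with hmval
      set t3 := t2.set node mval with ht3
      have hg1' : GoodTree t3 h (2*node) s mid := by
        refine goodTree_congr (mid - s) (2*node) s mid t1 t3 h rfl (fun m hm => ?_) g1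
        have hm_ne : node ≠ m := by
          intro hh
          exact not_insub_self_child hnode (Or.inl rfl) (hh ▸ hm)
        rw [ht3, getD_set_ne' _ _ _ _ _ hm_ne]
        exact hfr21 m (fun hc => insub_disjoint hnode hm hc)
      have hg2' : GoodTree t3 h (2*node+1) (mid+1) e := by
        refine goodTree_congr (e - (mid+1)) (2*node+1) (mid+1) e t2 t3 h rfl (fun m hm => ?_) g2
        have hm_ne : node ≠ m := by
          intro hh
          exact not_insub_self_child hnode (Or.inr rfl) (hh ▸ hm)
        rw [ht3, getD_set_ne' _ _ _ _ _ hm_ne]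
      rw [GoodTree]
      refine ⟨?_, fun _ => ⟨hg1', hg2'⟩⟩
      have hroot : t3.getD node 0 = mval := getD_set_self' _ _ _ _ (by omega)
      have hv1 : t2.getD (2*node) 0 = rmin h s mid := by
        rw [hfr21 (2*node) (fun hc => insub_disjoint hnode (insub_self _) hc)]
        rw [GoodTree] at g1
        exact g1.1
      have hv2 : t2.getD (2*node+1) 0 = rmin h (mid+1) e := by
        rw [GoodTree] at g2
        exact g2.1
      rw [hroot, hmval, hv1, hv2, rmin_split h (mid - s) s mid e rfl hm1 hm2]

-- ----- query correctness -----
theorem qLast_spec (h : List Int) (l r v : Int) : ∀ f : Nat, ∀ (node s e : Nat) (t : List Int),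
    GoodTree t h node s e → s ≤ e → e+1-s ≤ f → l ≤ (e:Int) → (s:Int) ≤ r →
    qLast t f node s e l r v = glast h (max (s:Int) l) (min (e:Int) r) v := by
  intro f
  induction f with
  | zero => intro node s e t _ _ hf _ _; omega
  | succ f ih =>
    intro node s e t hg hse hf hle hsr
    rw [GoodTree] at hg
    rw [qLast]
    by_cases hcond : l > r ∨ v ≤ t.getD node 0
    · rw [if_pos hcond]
      rcases hcond with hlr | hval
      · rw [glast, if_pos (by omega)]
      · refine (glast_none_of h v (min (e:Int) r + 1 - max (s:Int) l).toNat _ _ rfl ?_).symm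
        intro j h1 h2
        have hj1 : s ≤ j.toNat := by omega
        have hj2 : j.toNat ≤ e := by omega
        calc v ≤ t.getD node 0 := hval
        _ = rmin h s e := hg.1
        _ ≤ h.getD j.toNat 0 := rmin_le h (e - s) s e j.toNat rfl hj1 hj2
    · rw [if_neg hcond]
      push_neg at hcond
      obtain ⟨hlr, hval⟩ := hcond
      by_cases heq : s = e
      · rw [if_pos heq]
        subst heq
        have hmax : max (s:Int) l = (s:Int) := by omega
        have hmin : min (s:Int) r = (s:Int) := by omega
        rw [hmax, hmin, glast, if_neg (by omega), if_pos (by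
          rw [Int.toNat_natCast]
          have : rmin h s s = h.getD s 0 := by rw [rmin, if_pos le_rfl]
          rw [← this, ← hg.1]
          exact hval)]
      · rw [if_neg heq]
        simp only
        have hslt : s < e := by omega
        obtain ⟨g1, g2⟩ := hg.2 hslt
        set mid := (s+e)/2 with hmid
        have hm1 : s ≤ mid := by omega
        have hm2 : mid < e := by omega
        by_cases hmr : (mid:Int) < r
        · have hih : qLast t f (2*node+1) (mid+1) e l r v
              = glast h (max ((mid:Int)+1) l) (min (e:Int) r) v := by
            have := ih (2*node+1) (mid+1) e t g2 (by omega) (by omega) hle (by push_cast; omega)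
            push_cast at this
            exact this
          rw [if_pos hmr, hih]
          by_cases hres : glast h (max ((mid:Int)+1) l) (min (e:Int) r) v = -1
          · rw [if_neg (by rw [hres]; simp)]
            by_cases hlm : l ≤ (mid:Int)
            · rw [if_pos hlm]
              have hihl : qLast t f (2*node) s mid l r v
                  = glast h (max (s:Int) l) (min (mid:Int) r) v :=
                ih (2*node) s mid t g1 hm1 (by omega) (by push_cast; omega) hsr
              rw [hihl]
              have hminm : min (mid:Int) r = (mid:Int) := by omega
              rw [hminm]
              refine (glast_drop_upper h v (min (e:Int) r - (mid:Int)).toNat _ _ _ rfl (by omega) ?_).symm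
              intro j h1 h2
              refine glast_forall_of_none h v (min (e:Int) r + 1 - max ((mid:Int)+1) l).toNat _ _ rfl
                (by omega) hres j (by omega) h2
            · rw [if_neg hlm]
              have h1 : max ((mid:Int)+1) l = l := by omega
              have h2 : max (s:Int) l = l := by omega
              rw [h2, ← h1, hres]
          · rw [if_pos hres]
            exact (glast_extend_left h v (min (e:Int) r + 1 - max ((mid:Int)+1) l).toNat
              (max (s:Int) l) (max ((mid:Int)+1) l) (min (e:Int) r) rfl (by omega) hres).symm
        · rw [if_neg hmr]
          rw [if_neg (by simp)]
          by_cases hlm : l ≤ (mid:Int)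
          · rw [if_pos hlm]
            have hihl : qLast t f (2*node) s mid l r v
                = glast h (max (s:Int) l) (min (mid:Int) r) v :=
              ih (2*node) s mid t g1 hm1 (by omega) (by push_cast; omega) hsr
            rw [hihl]
            have : min (mid:Int) r = min (e:Int) r := by omega
            rw [this]
          · rw [if_neg hlm]
            rw [glast, if_pos (by omega)]

theorem qFirst_spec (h : List Int) (l r v : Int) : ∀ f : Nat, ∀ (node s e : Nat) (t : List Int),
    GoodTree t h node s e → s ≤ e → e+1-s ≤ f → l ≤ (e:Int) → (s:Int) ≤ r →
    qFirst t f node s e l r v = gfirst h (max (s:Int) l) (min (e:Int) r) v := by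
  intro f
  induction f with
  | zero => intro node s e t _ _ hf _ _; omega
  | succ f ih =>
    intro node s e t hg hse hf hle hsr
    rw [GoodTree] at hg
    rw [qFirst]
    by_cases hcond : l > r ∨ v ≤ t.getD node 0
    · rw [if_pos hcond]
      rcases hcond with hlr | hval
      · rw [gfirst, if_pos (by omega)]
      · refine (gfirst_none_of h v (min (e:Int) r + 1 - max (s:Int) l).toNat _ _ rfl ?_).symm
        intro j h1 h2
        have hj1 : s ≤ j.toNat := by omega
        have hj2 : j.toNat ≤ e := by omega
        calc v ≤ t.getD node 0 := hval
        _ = rmin h s e := hg.1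
        _ ≤ h.getD j.toNat 0 := rmin_le h (e - s) s e j.toNat rfl hj1 hj2
    · rw [if_neg hcond]
      push_neg at hcond
      obtain ⟨hlr, hval⟩ := hcond
      by_cases heq : s = e
      · rw [if_pos heq]
        subst heq
        have hmax : max (s:Int) l = (s:Int) := by omega
        have hmin : min (s:Int) r = (s:Int) := by omega
        rw [hmax, hmin, gfirst, if_neg (by omega), if_pos (by
          rw [Int.toNat_natCast]
          have : rmin h s s = h.getD s 0 := by rw [rmin, if_pos le_rfl]
          rw [← this, ← hg.1]
          exact hval)]
      · rw [if_neg heq]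
        simp only
        have hslt : s < e := by omega
        obtain ⟨g1, g2⟩ := hg.2 hslt
        set mid := (s+e)/2 with hmid
        have hm1 : s ≤ mid := by omega
        have hm2 : mid < e := by omega
        by_cases hlm : l ≤ (mid:Int)
        · have hih : qFirst t f (2*node) s mid l r v
              = gfirst h (max (s:Int) l) (min (mid:Int) r) v :=
            ih (2*node) s mid t g1 hm1 (by omega) (by push_cast; omega) hsr
          rw [if_pos hlm, hih]
          by_cases hres : gfirst h (max (s:Int) l) (min (mid:Int) r) v = -1
          · rw [if_neg (by rw [hres]; simp)]
            by_cases hmr : (mid:Int) < r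
            · rw [if_pos hmr]
              have hihr : qFirst t f (2*node+1) (mid+1) e l r v
                  = gfirst h (max ((mid:Int)+1) l) (min (e:Int) r) v := by
                have := ih (2*node+1) (mid+1) e t g2 (by omega) (by omega) hle (by push_cast; omega)
                push_cast at this
                exact this
              rw [hihr]
              have hmaxr : max ((mid:Int)+1) l = (mid:Int)+1 := by omega
              rw [hmaxr]
              refine (gfirst_drop_lower h v ((mid:Int)+1 - max (s:Int) l).toNat _ _ _ rfl (by omega) ?_).symm
              intro j h1 h2
              refine gfirst_forall_of_none h v (min (mid:Int) r + 1 - max (s:Int) l).toNat _ _ rfl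
                (by omega) hres j h1 (by omega)
            · rw [if_neg hmr]
              have : min (mid:Int) r = min (e:Int) r := by omega
              rw [← this, hres]
          · rw [if_pos hres]
            exact (gfirst_extend_right h v (min (mid:Int) r + 1 - max (s:Int) l).toNat
              (max (s:Int) l) (min (mid:Int) r) (min (e:Int) r) rfl (by omega) hres).symm
        · rw [if_neg hlm]
          rw [if_neg (by simp)]
          by_cases hmr : (mid:Int) < r
          · rw [if_pos hmr]
            have hihr : qFirst t f (2*node+1) (mid+1) e l r v
                = gfirst h (max ((mid:Int)+1) l) (min (e:Int) r) v := by
              have := ih (2*node+1) (mid+1) e t g2 (by omega) (by omega) hle (by push_cast; omega)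
              push_cast at this
              exact this
            rw [hihr]
            have h1 : max ((mid:Int)+1) l = l := by omega
            have h2 : max (s:Int) l = l := by omega
            rw [h1, h2]
          · rw [if_neg hmr]
            rw [gfirst, if_pos (by omega)]

-- ----- root-level query characterizations -----
theorem qLast_root (h t : List Int) (hg : GoodTree t h 1 0 (h.length-1)) (hn : 1 ≤ h.length)
    (r v : Int) (hr2 : r ≤ (h.length:Int)-1) :
    qLast t h.length 1 0 (h.length-1) 0 r v = lastLess h r v := by
  by_cases hr0 : r < 0
  · obtain ⟨f, hf⟩ : ∃ f, h.length = f + 1 := ⟨h.length - 1, by omega⟩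
    rw [hf, qLast, if_pos (Or.inl (by omega)), lastLess, if_pos hr0]
  · rw [qLast_spec h 0 r v h.length 1 0 (h.length-1) t hg (by omega) (by omega)
      (by push_cast; omega) (by push_cast; omega)]
    have hmax : max ((0:Nat):Int) 0 = 0 := by simp
    have hmin : min ((h.length-1 : Nat):Int) r = r := by omega
    rw [hmax, hmin, lastLess_eq_glast h v (r+1).toNat r rfl]

theorem qFirst_root (h t : List Int) (hg : GoodTree t h 1 0 (h.length-1)) (hn : 1 ≤ h.length)
    (l v : Int) (hl0 : 0 ≤ l) (hl : l ≤ (h.length:Int)) :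
    (if qFirst t h.length 1 0 (h.length-1) l ((h.length:Int)-1) v = -1 then (h.length:Int)
     else qFirst t h.length 1 0 (h.length-1) l ((h.length:Int)-1) v) = firstLess h l v := by
  by_cases hln : (h.length:Int) ≤ l
  · have hq : qFirst t h.length 1 0 (h.length-1) l ((h.length:Int)-1) v = -1 := by
      obtain ⟨f, hf⟩ : ∃ f, h.length = f + 1 := ⟨h.length - 1, by omega⟩
      rw [hf, qFirst, if_pos (Or.inl (by push_cast at hln ⊢; omega))]
    rw [hq, if_pos rfl, firstLess, if_pos hln]
  · rw [qFirst_spec h l ((h.length:Int)-1) v h.length 1 0 (h.length-1) t hg (by omega) (by omega)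
      (by push_cast; omega) (by push_cast; omega)]
    have hmax : max ((0:Nat):Int) l = l := by simp [hl0]
    have hmin : min ((h.length-1 : Nat):Int) ((h.length:Int)-1) = (h.length:Int)-1 := by omega
    rw [hmax, hmin, ← firstLess_eq_gfirst h v ((h.length:Int)-l).toNat l rfl hl0]

theorem main_good (h : List Int) (hn : 1 ≤ h.length) :
    GoodTree (buildA h h.length 1 0 (h.length-1) (List.replicate (4*h.length) 0)) h 1 0 (h.length-1) := by
  apply buildA_spec h h.length 1 0 (h.length-1) _ (by omega) (by omega) (by omega)
  rw [List.length_replicate, show h.length-1+1-0 = h.length from by omega]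
  rcases Nat.eq_or_lt_of_le hn with h1 | h1
  · rw [← h1, Nat.clog_one_right]
    omega
  · have hlt := Nat.pow_pred_clog_lt_self (b:=2) (by norm_num) (x:=h.length) h1
    rw [Nat.pred_eq_sub_one] at hlt
    have hc1 : 1 ≤ Nat.clog 2 h.length := Nat.clog_pos (by norm_num) h1
    have h2 : 2^(Nat.clog 2 h.length) = 2*2^(Nat.clog 2 h.length - 1) := by
      rw [← pow_succ']
      congr 1
      omega
    omega

theorem foldl_range_congr (f g : Int → Nat → Int) : ∀ (n : Nat) (acc : Int),
    (∀ (acc : Int) (i : Nat), i < n → f acc i = g acc i) →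
    (List.range n).foldl f acc = (List.range n).foldl g acc := by
  intro n
  induction n with
  | zero => intro acc _; rfl
  | succ n ih =>
    intro acc hfg
    rw [List.range_succ, List.foldl_append, List.foldl_append]
    simp only [List.foldl_cons, List.foldl_nil]
    rw [ih acc (fun a i hi => hfg a i (by omega)), hfg _ n (by omega)]

theorem max_area_with_boost_spec : Claim_equal_max_area_with_boost := by
  intro h b _ hne
  unfold Spec_max_area_with_boost max_area_with_boost max_area_with_boost_alt
  simp only []
  have hn : 1 ≤ h.length := by
    cases h with
    | nil => exact absurd rfl hne
    | cons a l => simp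
  have hg := main_good h hn
  apply foldl_range_congr
  intro acc i hi
  rw [qLast_root h _ hg hn ((i:Int)-1) (h.getD i 0 + b) (by push_cast; omega),
      qLast_root h _ hg hn ((i:Int)-1) (h.getD i 0) (by push_cast; omega),
      qFirst_root h _ hg hn ((i:Int)+1) (h.getD i 0 + b) (by omega) (by push_cast; omega),
      qFirst_root h _ hg hn ((i:Int)+1) (h.getD i 0) (by omega) (by push_cast; omega)]
  have hL1 := lastLess_range h (h.getD i 0) (((i:Int)-1)+1).toNat ((i:Int)-1) rfl
  rw [qLast_root h _ hg hn (lastLess h ((i:Int)-1) (h.getD i 0) - 1) (h.getD i 0)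
      (by rcases hL1 with h1 | h1 <;> push_cast <;> omega)]
  have hR1 := firstLess_range h (h.getD i 0) ((h.length:Int)-((i:Int)+1)).toNat ((i:Int)+1) rfl
      (by omega) (by push_cast; omega)
  by_cases hgd : firstLess h ((i:Int)+1) (h.getD i 0) ≠ (h.length:Int) ∧
      h.getD i 0 ≤ h.getD (firstLess h ((i:Int)+1) (h.getD i 0)).toNat 0 + b
  · rw [if_pos hgd, if_pos hgd,
      qFirst_root h _ hg hn (firstLess h ((i:Int)+1) (h.getD i 0) + 1) (h.getD i 0)
        (by omega) (by obtain ⟨h1, _⟩ := hgd; push_cast at h1 ⊢; omega)]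
  · rw [if_neg hgd, if_neg hgd]
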